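-- pv_equiv track=rewrite | github.com/ybsrinivasa/rootstalk-backend | app/services/bl10_order_state.py | derive_order_status_from_items
-- ===== SOURCE A (Python) =====
-- from typing import Optional
--
-- def derive_order_status_from_items(item_statuses: list[str]) -> Optional[str]:
--     """Mirrors the logic in router._update_order_status, lifted here so
--     it can be unit-tested without a DB. Looks at items currently in
--     SENT_FOR_APPROVAL or APPROVED — the "approval pool":
--
--     - all in pool are APPROVED (and pool non-empty) → COMPLETED
--     - any in pool are APPROVED                     → PARTIALLY_APPROVED
--     - otherwise                                    → None (caller leaves
--       the order's existing status untouched)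
--     """
--     pool = [s for s in item_statuses if s in ("SENT_FOR_APPROVAL", "APPROVED")]
--     approved = [s for s in pool if s == "APPROVED"]
--     if not approved:
--         return None
--     if len(approved) == len(pool):
--         return "COMPLETED"
--     return "PARTIALLY_APPROVED"
-- ===== SOURCE B (Python) =====
-- def derive_order_status_from_items(item_statuses):
--     # Single left-to-right pass with an early exit: as soon as both an
--     # APPROVED and a SENT_FOR_APPROVAL item have been seen the answer is
--     # fixed, so the scan stops there.
--     seen_approved = False
--     seen_sent = False
--     for s in item_statuses:
--         if s == "APPROVED":
--             seen_approved = True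
--         elif s == "SENT_FOR_APPROVAL":
--             seen_sent = True
--         if seen_approved and seen_sent:
--             return "PARTIALLY_APPROVED"
--     return "COMPLETED" if seen_approved else None
-- ===== Notes on version B (the rewrite author's own statement) =====
-- stated objective: alternative
-- what changed: Replaces A's two staged list comprehensions plus length comparison by a single left-to-right state-machine scan carrying two flags that exits early the moment both token kinds have been seen.
import Mathlib
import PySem

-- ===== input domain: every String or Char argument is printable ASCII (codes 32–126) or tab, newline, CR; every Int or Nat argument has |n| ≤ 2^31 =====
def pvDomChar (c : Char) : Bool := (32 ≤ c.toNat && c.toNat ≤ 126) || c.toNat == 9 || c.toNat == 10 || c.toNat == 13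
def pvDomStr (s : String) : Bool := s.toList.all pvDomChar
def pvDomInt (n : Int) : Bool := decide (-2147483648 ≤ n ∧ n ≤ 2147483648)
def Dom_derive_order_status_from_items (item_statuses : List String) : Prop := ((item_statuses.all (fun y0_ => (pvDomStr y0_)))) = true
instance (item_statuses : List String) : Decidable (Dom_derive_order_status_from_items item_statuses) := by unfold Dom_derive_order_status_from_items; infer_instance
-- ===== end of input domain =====

-- B replaces A's two staged list comprehensions and length comparison by a single
-- early-exiting state-machine scan over the list (alternative decomposition).


-- ===== PORT A =====
def derive_order_status_from_items (item_statuses : List String) : Option String :=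
  let pool := item_statuses.filter (fun s => s == "SENT_FOR_APPROVAL" || s == "APPROVED")
  let approved := pool.filter (fun s => s == "APPROVED")
  if approved.isEmpty then none
  else if approved.length == pool.length then some "COMPLETED"
  else some "PARTIALLY_APPROVED"

-- ===== PORT B =====
-- the loop of Source B: carries the two flags, exits early when both are set
def dosLoop : List String → Bool → Bool → Option String
  | [], sa, _ => if sa then some "COMPLETED" else none
  | s :: t, sa, ss =>
    let sa' := if s == "APPROVED" then true else sa
    let ss' := if s == "SENT_FOR_APPROVAL" then true else ss
    if sa' && ss' then some "PARTIALLY_APPROVED" else dosLoop t sa' ss'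

def derive_order_status_from_items_alt (item_statuses : List String) : Option String :=
  dosLoop item_statuses false false

-- ===== PRECONDITION & SPEC =====
def Spec_derive_order_status_from_items (item_statuses : List String) (out : Option String) : Prop := out = derive_order_status_from_items_alt item_statuses
instance (item_statuses : List String) (out : Option String) : Decidable (Spec_derive_order_status_from_items item_statuses out) := by unfold Spec_derive_order_status_from_items; infer_instance

-- ===== CLAIM (what is proved, stated in full; the proofs are below) =====
def Claim_equal_derive_order_status_from_items : Prop := ∀ (item_statuses : List String), Dom_derive_order_status_from_items item_statuses → Spec_derive_order_status_from_items item_statuses (derive_order_status_from_items item_statuses)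

-- ===== LEMMAS AND PROOFS =====

-- common closed form both ports are reduced to
def dosCF (xs : List String) : Option String :=
  if xs.contains "APPROVED" then
    if xs.contains "SENT_FOR_APPROVAL" then some "PARTIALLY_APPROVED"
    else some "COMPLETED"
  else none

-- the loop computes the closed form relative to the flags it carries
theorem dosLoop_eq_cf (xs : List String) : ∀ (sa ss : Bool), ¬(sa = true ∧ ss = true) →
    dosLoop xs sa ss =
      (if sa || xs.contains "APPROVED" then
        if ss || xs.contains "SENT_FOR_APPROVAL" then some "PARTIALLY_APPROVED"
        else some "COMPLETED"
      else none) := by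
  induction xs with
  | nil => intro sa ss h; cases sa <;> cases ss <;> simp_all [dosLoop]
  | cons s t ih =>
    intro sa ss h
    have h00 := ih false false (by simp)
    have h01 := ih false true (by simp)
    have h10 := ih true false (by simp)
    by_cases hA : s = "APPROVED" <;> by_cases hS : s = "SENT_FOR_APPROVAL" <;>
      cases sa <;> cases ss <;>
        simp_all [dosLoop] <;> simp_all [eq_comm]

theorem alt_eq_cf (xs : List String) : derive_order_status_from_items_alt xs = dosCF xs := by
  unfold derive_order_status_from_items_alt dosCF
  rw [dosLoop_eq_cf xs false false (by simp)]
  simp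

-- the approved list is the direct filter of the input
theorem approved_eq (xs : List String) :
    ((xs.filter (fun s => s == "SENT_FOR_APPROVAL" || s == "APPROVED")).filter
        (fun s => s == "APPROVED")) = xs.filter (fun s => s == "APPROVED") := by
  rw [List.filter_filter]
  apply List.filter_congr
  intro a _
  by_cases hA : a = "APPROVED" <;> simp [hA]

-- pool count splits into the two disjoint token counts
theorem pool_length_split (xs : List String) :
    xs.countP (fun s => s == "SENT_FOR_APPROVAL" || s == "APPROVED") =
      xs.countP (fun s => s == "APPROVED") + xs.countP (fun s => s == "SENT_FOR_APPROVAL") := by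
  induction xs with
  | nil => simp
  | cons h t ih =>
    by_cases hA : h = "APPROVED" <;> by_cases hS : h = "SENT_FOR_APPROVAL" <;>
      simp_all <;> omega

theorem a_eq_cf (xs : List String) : derive_order_status_from_items xs = dosCF xs := by
  unfold derive_order_status_from_items dosCF
  simp only [approved_eq, pool_length_split, ← List.countP_eq_length_filter,
    List.isEmpty_iff, List.filter_eq_nil_iff, List.contains_eq_mem]
  have hA : (∀ a ∈ xs, ¬(a == "APPROVED") = true) ↔ "APPROVED" ∉ xs := by
    constructor
    · intro h hm; have := h _ hm; simp at this
    · intro h a ha; simp only [beq_iff_eq]; intro he; exact h (he ▸ ha)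
  have hS : (xs.countP (fun s => s == "SENT_FOR_APPROVAL") = 0) ↔ "SENT_FOR_APPROVAL" ∉ xs := by
    rw [List.countP_eq_zero]
    constructor
    · intro h hm; have := h _ hm; simp at this
    · intro h a ha; simp only [beq_iff_eq]; intro he; exact h (he ▸ ha)
  split_ifs with h1 h2 h3 h4 <;> simp_all

-- ===== VERDICT (by name: the statement is the Claim_ definition above) =====
theorem derive_order_status_from_items_spec : Claim_equal_derive_order_status_from_items := by
  intro xs _
  unfold Spec_derive_order_status_from_items
  rw [a_eq_cf, alt_eq_cf]
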